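-- pv_equiv track=rewrite | github.com/jontsnz/import-daily-to-jira | import_timesheet.py | build_jobno
-- ===== SOURCE A (Python) =====
-- def build_jobno(desc: str) -> str:
--     jobno = desc.upper().replace('-','').split(' ')[0]
--     # find the index of the first digit in jobno
--     for i in range(len(jobno)):
--         if jobno[i].isdigit():
--             proj =  jobno[:i]
--             seq = jobno[i:]
--             jobno = proj + '-' + seq
--             break
--     return jobno
-- ===== SOURCE B (Python) =====
-- def build_jobno(desc: str) -> str:
--     jobno = desc.upper().replace('-', '').split(' ')[0]
--     out = []
--     it = iter(jobno)
--     for c in it: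
--         if c.isdigit():
--             return ''.join(out) + '-' + c + ''.join(it)
--         out.append(c)
--     return jobno
-- ===== Notes on version B (the rewrite author's own statement) =====
-- stated objective: alternative
-- what changed: Replaces A's range(len) index scan with break followed by two slices and a splice by a single accumulator pass over an iterator that, at the first digit, returns the accumulated prefix, a dash, the digit and the remainder of the iterator, using no indices or slicing.
import Mathlib
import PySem

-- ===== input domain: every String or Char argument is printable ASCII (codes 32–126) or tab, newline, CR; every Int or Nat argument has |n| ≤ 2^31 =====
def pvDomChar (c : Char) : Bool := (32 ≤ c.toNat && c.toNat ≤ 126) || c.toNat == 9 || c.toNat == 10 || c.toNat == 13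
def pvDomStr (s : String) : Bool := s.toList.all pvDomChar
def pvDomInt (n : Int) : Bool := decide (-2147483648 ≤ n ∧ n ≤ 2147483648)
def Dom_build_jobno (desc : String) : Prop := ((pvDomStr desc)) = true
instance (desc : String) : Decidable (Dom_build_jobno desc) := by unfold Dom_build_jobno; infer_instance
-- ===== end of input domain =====

-- B replaces A's index scan + slice splice with a single accumulator pass over the
-- characters (objective: alternative/idiomatic; same cost).

-- ===== PORT A =====
-- shared normalisation: desc.upper().replace('-','').split(' ')[0]
-- ('[0]' on the result of split(' ') always exists, so headD [] is exact)
def pvNorm (desc : String) : List Char :=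
  (PySem.Chars.splitOn (PySem.Chars.replace (PySem.Chars.upper desc.toList) ['-'] []) [' ']).headD []

-- the 'for i in range(len(jobno)): … break' scan of A, step for step
def pvLoopA (jobno : List Char) (i : Nat) : List Char :=
  if h : i < jobno.length then
    if PySem.Chars.isdigit jobno[i] then
      PySem.List.slice jobno none (some (i : Int)) ++ ['-'] ++ PySem.List.slice jobno (some (i : Int)) none
    else pvLoopA jobno (i + 1)
  else jobno
termination_by jobno.length - i

def build_jobno (desc : String) : String :=
  String.ofList (pvLoopA (pvNorm desc) 0)

-- ===== PORT B =====
-- B's loop: accumulate chars until the first digit, then acc + '-' + c + rest of the iterator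
def pvLoopB (jobno : List Char) (acc : List Char) : List Char → List Char
  | [] => jobno
  | c :: rest =>
      if PySem.Chars.isdigit c then acc ++ '-' :: c :: rest
      else pvLoopB jobno (acc ++ [c]) rest

def build_jobno_alt (desc : String) : String :=
  String.ofList (pvLoopB (pvNorm desc) [] (pvNorm desc))

-- ===== PRECONDITION & SPEC =====
def Spec_build_jobno (desc : String) (out : String) : Prop := out = build_jobno_alt desc
instance (desc : String) (out : String) : Decidable (Spec_build_jobno desc out) := by unfold Spec_build_jobno; infer_instance

-- ===== CLAIM (what is proved, stated in full; the proofs are below) =====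
def Claim_equal_build_jobno : Prop := ∀ (desc : String), Dom_build_jobno desc → Spec_build_jobno desc (build_jobno desc)

-- ===== LEMMAS AND PROOFS =====
-- proof-only middleman: insert a dash before the first digit
def pvDash : List Char → List Char
  | [] => []
  | c :: rest => if PySem.Chars.isdigit c then '-' :: c :: rest else c :: pvDash rest

theorem pvLoopA_eq_dash (cs : List Char) :
    ∀ i, pvLoopA cs i = cs.take i ++ pvDash (cs.drop i) := by
  intro i
  induction hn : cs.length - i using Nat.strong_induction_on generalizing i with
  | _ n ih =>
    unfold pvLoopA
    split
    · rename_i h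
      by_cases hd : PySem.Chars.isdigit cs[i]
      · rw [if_pos hd, PySem.List.slice_to_natCast, PySem.List.slice_from_natCast,
          List.drop_eq_getElem_cons h]
        simp [pvDash, hd]
      · rw [if_neg hd, ih (cs.length - (i+1)) (by omega) (i+1) rfl,
          List.drop_eq_getElem_cons h]
        have ht : List.take (i + 1) cs = List.take i cs ++ [cs[i]] := by
          rw [List.take_add_one, List.getElem?_eq_getElem h]; rfl
        rw [ht, List.append_assoc, List.singleton_append]
        simp [pvDash, hd]
    · rename_i h
      simp [pvDash, List.take_of_length_le (le_of_not_gt (by omega)), List.drop_of_length_le (le_of_not_gt (by omega))]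

theorem pvLoopB_eq_dash (cs : List Char) :
    ∀ rest acc, acc ++ rest = cs → pvLoopB cs acc rest = acc ++ pvDash rest := by
  intro rest
  induction rest with
  | nil => intro acc h; simpa [pvLoopB, pvDash] using h.symm
  | cons c rest ih =>
    intro acc h
    unfold pvLoopB
    by_cases hd : PySem.Chars.isdigit c
    · simp [hd, pvDash]
    · simp only [hd, pvDash]
      rw [ih (acc ++ [c]) (by simpa using h)]
      simp

-- ===== VERDICT (by name: the statement is the Claim_ definition above) =====
theorem build_jobno_spec : Claim_equal_build_jobno := by
  intro desc _
  unfold Spec_build_jobno build_jobno build_jobno_alt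
  rw [pvLoopA_eq_dash (pvNorm desc) 0, pvLoopB_eq_dash (pvNorm desc) (pvNorm desc) [] (by simp)]
  simp
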